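-- pv_equiv track=rewrite | github.com/feiwangyuzhou/VMCL | getsparsitydata.py | reidx_withr
-- ===== SOURCE A (Python) =====
-- def reidx_withr(tri, rel_reidx):
--     tri_reidx = []
--     ent_reidx = dict()
--     entidx = 0
--     for h, r, t in tri:
--         if h not in ent_reidx.keys():
--             ent_reidx[h] = entidx
--             entidx += 1
--         if t not in ent_reidx.keys():
--             ent_reidx[t] = entidx
--             entidx += 1
--         tri_reidx.append([ent_reidx[h], rel_reidx[r], ent_reidx[t]])
--     # pdb.set_trace()
--     # for h in ent_reidx.keys():
--     #     tri_reidx.append([ent_reidx[h], rel_reidx['self'], ent_reidx[h]])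
--
--     return tri_reidx, dict(ent_reidx)
-- ===== SOURCE B (Python) =====
-- def reidx_withr(tri, rel_reidx):
--     # entity index = rank of first occurrence in the h,t stream:
--     # sort the distinct-entity set by first position instead of counting incrementally
--     stream = [e for h, _, t in tri for e in (h, t)]
--     order = sorted(set(stream), key=stream.index)
--     ent_reidx = {e: i for i, e in enumerate(order)}
--     tri_reidx = [[ent_reidx[h], rel_reidx[r], ent_reidx[t]] for h, r, t in tri]
--     return tri_reidx, ent_reidx
-- ===== Notes on version B (the rewrite author's own statement) =====
-- stated objective: alternative
-- what changed: A grows the entity dict with an incremental counter inside the triple loop; B instead characterises the index as rank of first occurrence: it sorts the distinct-entity set by stream.index (first-occurrence position) and enumerates the sorted order, then maps the triples in a comprehension.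
import Mathlib
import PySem

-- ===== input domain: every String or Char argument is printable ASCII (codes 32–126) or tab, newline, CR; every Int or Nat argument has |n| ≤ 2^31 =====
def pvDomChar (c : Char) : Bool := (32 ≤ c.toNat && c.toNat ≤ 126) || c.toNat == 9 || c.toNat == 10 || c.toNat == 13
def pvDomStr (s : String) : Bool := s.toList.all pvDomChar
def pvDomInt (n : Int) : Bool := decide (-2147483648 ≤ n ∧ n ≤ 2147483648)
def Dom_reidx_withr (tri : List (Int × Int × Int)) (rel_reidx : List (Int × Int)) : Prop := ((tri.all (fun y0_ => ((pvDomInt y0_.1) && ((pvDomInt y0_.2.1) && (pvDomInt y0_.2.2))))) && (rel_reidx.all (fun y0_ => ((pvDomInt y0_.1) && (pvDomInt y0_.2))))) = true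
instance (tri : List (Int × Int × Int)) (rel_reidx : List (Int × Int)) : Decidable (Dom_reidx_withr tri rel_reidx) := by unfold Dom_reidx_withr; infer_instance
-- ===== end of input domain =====

-- B replaces A's incremental-counter dict: the entity index is the rank of the entity's first
-- occurrence, so B sorts the distinct-entity set by first position and enumerates it, then maps.

-- ===== PORT A =====
-- A's one pass: grow ent_reidx/entidx per triple, append the reindexed row each iteration.
def reidx_withr_step (rel_reidx : List (Int × Int)) (st : List (List Int) × PySem.Dict Int Int × Int)
    (x : Int × Int × Int) : List (List Int) × PySem.Dict Int Int × Int :=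
  let (trir, ent, entidx) := st
  let (ent, entidx) :=
    if ent.contains x.1 then (ent, entidx) else (ent.insert x.1 entidx, entidx + 1)
  let (ent, entidx) :=
    if ent.contains x.2.2 then (ent, entidx) else (ent.insert x.2.2 entidx, entidx + 1)
  (trir ++ [[ent.getD x.1 0, ((rel_reidx.lookup x.2.1).getD 0), ent.getD x.2.2 0]], ent, entidx)

def reidx_withr (tri : List (Int × Int × Int)) (rel_reidx : List (Int × Int)) :
    List (List Int) × (List (Int × Int)) :=
  let st := tri.foldl (reidx_withr_step rel_reidx) ([], PySem.Dict.empty, (0 : Int))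
  (st.1, st.2.1.items)

-- ===== PORT B =====
-- Source B: stream of h,t; sorted(set(stream), key=stream.index); enumerate; map the triples.
def reidx_withr_alt (tri : List (Int × Int × Int)) (rel_reidx : List (Int × Int)) :
    List (List Int) × (List (Int × Int)) :=
  let stream := tri.flatMap (fun x => [x.1, x.2.2])
  let order := PySem.List.sorted (PySem.Set.ofList stream)
      (fun e => ((PySem.List.index? stream e).getD 0 : Nat)) false
  let ent : List (Int × Int) := (PySem.List.enumerate order).map (fun p => (p.2, p.1))
  let trir := tri.map (fun x =>
    [((ent.lookup x.1).getD 0), ((rel_reidx.lookup x.2.1).getD 0), ((ent.lookup x.2.2).getD 0)])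
  (trir, ent)

-- ===== PRECONDITION & SPEC =====
-- Pre_ excludes exactly the inputs where some relation of a triple is not a key of rel_reidx:
-- there Python's rel_reidx[r] raises KeyError in both A and B.
def Pre_reidx_withr (tri : List (Int × Int × Int)) (rel_reidx : List (Int × Int)) : Prop :=
  ∀ x ∈ tri, x.2.1 ∈ rel_reidx.map Prod.fst
instance (tri : List (Int × Int × Int)) (rel_reidx : List (Int × Int)) : Decidable (Pre_reidx_withr tri rel_reidx) := by unfold Pre_reidx_withr; infer_instance

def pvWitness_reidx_withr : (List (Int × Int × Int)) × (List (Int × Int)) :=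
  ([(1, 7, 2), (2, 8, 1), (3, 7, 3)], [(7, 0), (8, 1)])

def Spec_reidx_withr (tri : List (Int × Int × Int)) (rel_reidx : List (Int × Int)) (out : List (List Int) × (List (Int × Int))) : Prop := out = reidx_withr_alt tri rel_reidx
instance (tri : List (Int × Int × Int)) (rel_reidx : List (Int × Int)) (out : List (List Int) × (List (Int × Int))) : Decidable (Spec_reidx_withr tri rel_reidx out) := by unfold Spec_reidx_withr; infer_instance

-- ===== CLAIM (what is proved, stated in full; the proofs are below) =====
def Claim_equal_reidx_withr : Prop := ∀ (tri : List (Int × Int × Int)) (rel_reidx : List (Int × Int)), Dom_reidx_withr tri rel_reidx → Pre_reidx_withr tri rel_reidx → Spec_reidx_withr tri rel_reidx (reidx_withr tri rel_reidx)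

-- ===== LEMMAS AND PROOFS =====

-- B's sort key: first-occurrence position of e in l
def idxKey (l : List Int) (e : Int) : Nat := (PySem.List.index? l e).getD 0

-- the first-occurrence (set) order is strictly increasing in idxKey
theorem pairwise_idxKey (l : List Int) :
    (PySem.Set.ofList l).Pairwise (fun a b => idxKey l a < idxKey l b) := by
  induction l using List.reverseRecOn with
  | nil => simp [PySem.Set.ofList_nil]
  | append_singleton xs x ih =>
    rw [PySem.Set.ofList_append_singleton]
    have transport : ∀ a b : Int, a ∈ PySem.Set.ofList xs → b ∈ PySem.Set.ofList xs →
        idxKey xs a < idxKey xs b → idxKey (xs ++ [x]) a < idxKey (xs ++ [x]) b := by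
      intro a b ha hb hab
      have ha' : a ∈ xs := (PySem.Set.mem_ofList _ _).mp ha
      have hb' : b ∈ xs := (PySem.Set.mem_ofList _ _).mp hb
      unfold idxKey
      rw [PySem.List.index?_append_of_mem [x] ha', PySem.List.index?_append_of_mem [x] hb']
      exact hab
    by_cases hx : x ∈ xs
    · rw [PySem.Set.add_of_mem (by simpa [PySem.Set.mem_ofList] using hx)]
      exact ih.imp_of_mem (fun {a b} ha hb hab => transport a b ha hb hab)
    · rw [PySem.Set.add_of_not_mem (by simpa [PySem.Set.mem_ofList] using hx)]
      rw [List.pairwise_append]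
      refine ⟨ih.imp_of_mem (fun {a b} ha hb hab => transport a b ha hb hab), by simp, ?_⟩
      intro a ha b hb
      have ha' : a ∈ xs := (PySem.Set.mem_ofList _ _).mp ha
      simp only [List.mem_singleton] at hb; subst hb
      obtain ⟨k, hk⟩ := Option.isSome_iff_exists.mp
        ((PySem.List.index?_isSome_iff (xs := xs) (v := a)).mpr ha')
      obtain ⟨hlt, -, -⟩ := PySem.List.getElem_of_index?_eq_some hk
      have h1 : idxKey (xs ++ [b]) a = k := by
        unfold idxKey
        rw [PySem.List.index?_append_of_mem [b] ha', hk]; rfl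
      have h2 : idxKey (xs ++ [b]) b = xs.length := by
        unfold idxKey
        rw [PySem.List.index?_append_singleton_self xs b hx]; rfl
      omega

-- sorting the distinct-entity set by first position reproduces the first-appearance order
theorem sorted_ofList_idxKey (l : List Int) :
    PySem.List.sorted (PySem.Set.ofList l) (fun e => idxKey l e) false = PySem.Set.ofList l :=
  PySem.List.sorted_eq_of_perm_of_pairwise_lt (PySem.Set.ofList l) (PySem.Set.ofList l)
    (fun e => idxKey l e) (List.Perm.refl _) (pairwise_idxKey l)

-- the key list A's dict grows through a run of the loop, as a fold of Set.add
def keyF (ks : List Int) (l : List (Int × Int × Int)) : List Int :=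
  l.foldl (fun a x => PySem.Set.add (PySem.Set.add a x.1) x.2.2) ks

-- B's enumerated index table of a key list
def entL (ks : List Int) : List (Int × Int) :=
  (PySem.List.enumerate ks).map (fun p => (p.2, p.1))

theorem keyF_nil (ks : List Int) : keyF ks [] = ks := rfl

theorem keyF_cons (ks : List Int) (x : Int × Int × Int) (l : List (Int × Int × Int)) :
    keyF ks (x :: l) = keyF (PySem.Set.add (PySem.Set.add ks x.1) x.2.2) l := rfl

theorem keyF_append_suffix (l : List (Int × Int × Int)) (ks : List Int) :
    ∃ ks', keyF ks l = ks ++ ks' := by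
  have hadd : ∀ (s : List Int) (k : Int), ∃ t, PySem.Set.add s k = s ++ t := by
    intro s k
    rw [PySem.Set.add_eq_ite]
    split_ifs
    · exact ⟨[], by simp⟩
    · exact ⟨[k], rfl⟩
  induction l generalizing ks with
  | nil => exact ⟨[], by simp [keyF_nil]⟩
  | cons x l ih =>
    rw [keyF_cons]
    obtain ⟨t1, h1⟩ := hadd ks x.1
    obtain ⟨t2, h2⟩ := hadd (PySem.Set.add ks x.1) x.2.2
    obtain ⟨a, ha⟩ := ih (PySem.Set.add (PySem.Set.add ks x.1) x.2.2)
    refine ⟨(t1 ++ t2) ++ a, ?_⟩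
    rw [ha, h2, h1]
    simp [List.append_assoc]

theorem enumerate_append_singleton (ks : List Int) (k : Int) (s : Int) :
    PySem.List.enumerate (ks ++ [k]) s = PySem.List.enumerate ks s ++ [(s + ks.length, k)] := by
  induction ks generalizing s with
  | nil => simp [PySem.List.enumerate_cons, PySem.List.enumerate_nil]
  | cons a ks ih =>
    simp [PySem.List.enumerate_cons, ih, List.length_cons]
    ring_nf

theorem entL_append_singleton (ks : List Int) (k : Int) :
    entL (ks ++ [k]) = entL ks ++ [(k, (ks.length : Int))] := by
  simp [entL, enumerate_append_singleton]

theorem keys_entL (ks : List Int) : (entL ks).map Prod.fst = ks := by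
  have h := PySem.List.map_snd_enumerate ks (0 : Int)
  rw [entL, List.map_map]
  exact h

theorem lookup_entL_isSome (ks : List Int) (k : Int) (h : k ∈ ks) :
    ((entL ks).lookup k).isSome := by
  induction ks using List.reverseRecOn with
  | nil => simp at h
  | append_singleton ks a ih =>
    rw [entL_append_singleton]
    rcases List.mem_append.mp h with h' | h'
    · have := ih h'
      cases hl : (entL ks).lookup k with
      | none => simp [hl] at this
      | some v =>
        rw [List.lookup_append, hl]; simp
    · simp at h'
      subst h'
      cases hl : (entL ks).lookup k with
      | none => rw [List.lookup_append, hl]; simp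
      | some v => rw [List.lookup_append, hl]; simp

theorem lookup_entL_prefix (ks ks' : List Int) (k : Int) (h : k ∈ ks) :
    (entL (ks ++ ks')).lookup k = (entL ks).lookup k := by
  induction ks' using List.reverseRecOn with
  | nil => simp
  | append_singleton ks' a ih =>
    rw [← List.append_assoc, entL_append_singleton, List.lookup_append, ih]
    have hs := lookup_entL_isSome (ks ++ ks') k (List.mem_append.mpr (Or.inl h))
    rw [ih] at hs
    cases hl : (entL ks).lookup k with
    | none => rw [hl] at hs; simp at hs
    | some v => simp

-- A's dict after inserting the keys ks in order with indices 0,1,… is exactly entL ks as a Dict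
def dictOf (ks : List Int) : PySem.Dict Int Int := PySem.Dict.mk (entL ks)

theorem get?_mk_eq_lookup (l : List (Int × Int)) (k : Int) :
    (PySem.Dict.mk l).get? k = l.lookup k := by
  induction l with
  | nil => rfl
  | cons p l ih =>
    cases p with
    | mk a b =>
      rw [PySem.Dict.get?_mk_cons]
      rcases eq_or_ne a k with h | h
      · subst h; simp [List.lookup]
      · have hb1 : (a == k) = false := by simpa using h
        have hb2 : (k == a) = false := by simpa using Ne.symm h
        simp [List.lookup, hb1, hb2, ih]

theorem contains_dictOf (ks : List Int) (k : Int) :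
    (dictOf ks).contains k = decide (k ∈ ks) := by
  rw [dictOf, PySem.Dict.contains_eq_decide_mem_keys, PySem.Dict.keys_mk, keys_entL]

theorem getD_dictOf (ks : List Int) (k : Int) :
    (dictOf ks).getD k 0 = ((entL ks).lookup k).getD 0 := by
  rw [PySem.Dict.getD_eq_get?_getD, dictOf, get?_mk_eq_lookup]

theorem insert_dictOf_fresh (ks : List Int) (k : Int) (h : k ∉ ks) :
    (dictOf ks).insert k (ks.length : Int) = dictOf (ks ++ [k]) := by
  apply PySem.Dict.ext
  rw [PySem.Dict.items_insert_of_not_contains]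
  · show entL ks ++ [(k, (ks.length : Int))] = (dictOf (ks ++ [k])).items
    rw [← entL_append_singleton]; rfl
  · rw [contains_dictOf]; simpa using h

-- the row B computes for triple x from index table e
def rowOf (rel_reidx : List (Int × Int)) (e : List (Int × Int)) (x : Int × Int × Int) : List Int :=
  [((e.lookup x.1).getD 0), ((rel_reidx.lookup x.2.1).getD 0), ((e.lookup x.2.2).getD 0)]

theorem row_stable (rel_reidx : List (Int × Int)) (ks ks' : List Int)
    (x : Int × Int × Int) (h1 : x.1 ∈ ks) (h2 : x.2.2 ∈ ks) :
    rowOf rel_reidx (entL (ks ++ ks')) x = rowOf rel_reidx (entL ks) x := by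
  simp [rowOf, lookup_entL_prefix _ _ _ h1, lookup_entL_prefix _ _ _ h2]

-- the main loop invariant: running A's fold from the state encoding key list ks
theorem main_inv (rel_reidx : List (Int × Int)) (l : List (Int × Int × Int))
    (ks : List Int) (rows : List (List Int)) :
    l.foldl (reidx_withr_step rel_reidx) (rows, dictOf ks, (ks.length : Int))
    = (rows ++ l.map (rowOf rel_reidx (entL (keyF ks l))), dictOf (keyF ks l), ((keyF ks l).length : Int)) := by
  induction l generalizing ks rows with
  | nil => simp [keyF_nil]
  | cons x l ih =>
    have step :
        reidx_withr_step rel_reidx (rows, dictOf ks, (ks.length : Int)) x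
        = (rows ++ [rowOf rel_reidx (entL (PySem.Set.add (PySem.Set.add ks x.1) x.2.2)) x],
           dictOf (PySem.Set.add (PySem.Set.add ks x.1) x.2.2),
           ((PySem.Set.add (PySem.Set.add ks x.1) x.2.2).length : Int)) := by
      unfold reidx_withr_step
      by_cases h1 : x.1 ∈ ks
      · rw [PySem.Set.add_of_mem h1]
        by_cases h2 : x.2.2 ∈ ks
        · rw [PySem.Set.add_of_mem h2]
          simp [contains_dictOf, h1, h2, rowOf, getD_dictOf]
        · rw [PySem.Set.add_of_not_mem h2]
          simp only [contains_dictOf, h1, h2, decide_true, decide_false, if_true]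
          rw [insert_dictOf_fresh ks x.2.2 h2]
          simp [rowOf, getD_dictOf]
      · rw [PySem.Set.add_of_not_mem h1]
        have h1' : x.1 ∈ ks ++ [x.1] := by simp
        by_cases h2 : x.2.2 ∈ ks ++ [x.1]
        · rw [PySem.Set.add_of_mem h2]
          simp only [contains_dictOf, h1, decide_false]
          rw [insert_dictOf_fresh ks x.1 h1]
          simp [contains_dictOf, h2, rowOf, getD_dictOf]
        · rw [PySem.Set.add_of_not_mem h2]
          simp only [contains_dictOf, h1, decide_false]
          have hlen : ((ks.length : Int) + 1) = (((ks ++ [x.1]).length : Int)) := by simp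
          simp only [insert_dictOf_fresh ks x.1 h1, contains_dictOf, h2, decide_false,
            Bool.false_eq_true, if_false, hlen, insert_dictOf_fresh (ks ++ [x.1]) x.2.2 h2]
          simp [rowOf, getD_dictOf]
          ring
    rw [List.foldl_cons, step]
    set ks2 := PySem.Set.add (PySem.Set.add ks x.1) x.2.2 with hks2
    rw [ih ks2, keyF_cons]
    obtain ⟨d, hd⟩ := keyF_append_suffix l ks2
    have hx1 : x.1 ∈ ks2 := by
      rw [hks2]
      exact (PySem.Set.mem_add _ _ _).mpr (Or.inl ((PySem.Set.mem_add _ _ _).mpr (Or.inr rfl)))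
    have hx2 : x.2.2 ∈ ks2 := (PySem.Set.mem_add _ _ _).mpr (Or.inr rfl)
    have hrow : rowOf rel_reidx (entL (keyF ks2 l)) x = rowOf rel_reidx (entL ks2) x := by
      rw [hd]; exact row_stable _ _ _ _ hx1 hx2
    simp only [← hks2]
    simp [hrow]

theorem flatMap_foldl_keyF (l : List (Int × Int × Int)) (ks : List Int) :
    (l.flatMap (fun x => [x.1, x.2.2])).foldl PySem.Set.add ks = keyF ks l := by
  induction l generalizing ks with
  | nil => rfl
  | cons x l ih => simp only [List.flatMap_cons, List.foldl_append, List.foldl_cons,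
      List.foldl_nil, keyF_cons]; exact ih _

-- ===== VERDICT (by name: the statement is the Claim_ definition above) =====
theorem reidx_withr_spec : Claim_equal_reidx_withr := by
  intro tri rel_reidx _ _
  show reidx_withr tri rel_reidx = reidx_withr_alt tri rel_reidx
  have hA : reidx_withr tri rel_reidx =
      (tri.map (rowOf rel_reidx (entL (keyF [] tri))), entL (keyF [] tri)) := by
    unfold reidx_withr
    have h0 : (PySem.Dict.empty : PySem.Dict Int Int) = dictOf [] := rfl
    rw [h0]
    have hlen : (0 : Int) = (([] : List Int).length : Int) := rfl
    rw [hlen, main_inv rel_reidx tri [] []]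
    simp only [List.nil_append]
    rfl
  have hB : reidx_withr_alt tri rel_reidx =
      (tri.map (rowOf rel_reidx (entL (keyF [] tri))), entL (keyF [] tri)) := by
    unfold reidx_withr_alt
    have hsorted := sorted_ofList_idxKey (tri.flatMap (fun x => [x.1, x.2.2]))
    simp only [idxKey] at hsorted
    simp only [hsorted]
    simp only [PySem.Set.ofList_eq_foldl, flatMap_foldl_keyF]
    simp only [entL]
    rfl
  rw [hA, hB]
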